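-- pv_equiv track=rewrite | github.com/ChenApr/Jedusa | filter_data.py | is_good_conv
-- ===== SOURCE A (Python) =====
-- def normalize_role(r):
--     if r in ("human", "user"): return "user"
--     if r in ("gpt", "assistant", "bot"): return "assistant"
--     if r == "system": return "system"
--     return None
--
-- def is_good_conv(conv):
--     if not isinstance(conv, list) or len(conv) < 2:
--         return False
--     # 每条必须有 role/content
--     msgs = []
--     for m in conv:
--         if not isinstance(m, dict): return False
--         role = normalize_role(m.get("role") or m.get("from") or m.get("speaker"))
--         content = m.get("content") or m.get("value") or m.get("text") or ""
--         if role is None or not isinstance(content, str) or len(content.strip()) == 0: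
--             return False
--         if role == "system":
--             # system 可保留，但为了简单起见，先丢掉（也可以保留）
--             return False
--         msgs.append(role)
--
--     # 要求从 user 开始，且严格交替 user/assistant/...
--     if msgs[0] != "user":
--         return False
--     for i in range(1, len(msgs)):
--         if msgs[i] == msgs[i-1]:
--             return False
--     return True
-- ===== SOURCE B (Python) =====
-- def normalize_role(r):
--     if r in ("human", "user"): return "user"
--     if r in ("gpt", "assistant", "bot"): return "assistant"
--     if r == "system": return "system"
--     return None
--
-- def is_good_conv(conv):
--     if not isinstance(conv, list) or len(conv) < 2:
--         return False
--     # single pass: validate each message and check it carries the expected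
--     # alternating role (starting at "user"); "system" never matches expected.
--     expected = "user"
--     for m in conv:
--         if not isinstance(m, dict):
--             return False
--         role = normalize_role(m.get("role") or m.get("from") or m.get("speaker"))
--         content = m.get("content") or m.get("value") or m.get("text") or ""
--         if role is None or not isinstance(content, str) or len(content.strip()) == 0:
--             return False
--         if role != expected:
--             return False
--         expected = "assistant" if expected == "user" else "user"
--     return True
-- ===== Notes on version B (the rewrite author's own statement) =====
-- stated objective: simpler
-- what changed: Replaces A's build-a-role-list-then-rescan (collect msgs, then check msgs[0] and an index loop over adjacent pairs) with a single pass that tracks the expected alternating role; the explicit 'system' rejection disappears because 'system' can never equal the expected role.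
import Mathlib
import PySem

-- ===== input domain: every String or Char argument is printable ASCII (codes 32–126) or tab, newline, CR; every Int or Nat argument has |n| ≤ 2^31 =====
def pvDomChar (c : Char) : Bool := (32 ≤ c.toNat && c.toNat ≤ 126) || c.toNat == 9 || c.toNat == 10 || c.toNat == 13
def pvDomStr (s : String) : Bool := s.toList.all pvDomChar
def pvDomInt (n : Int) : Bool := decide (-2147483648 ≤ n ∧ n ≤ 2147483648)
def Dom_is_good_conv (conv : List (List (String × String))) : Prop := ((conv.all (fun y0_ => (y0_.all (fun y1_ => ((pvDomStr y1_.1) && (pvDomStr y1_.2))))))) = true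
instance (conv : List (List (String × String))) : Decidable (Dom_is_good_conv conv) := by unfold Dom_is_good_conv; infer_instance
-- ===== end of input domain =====

-- B replaces A's build-role-list-then-rescan with a single pass tracking the expected alternating role (simpler decomposition, same cost).


-- ===== PORT A =====
-- shared module-level helpers (both Pythons use the same dict lookups / `or` chains / normalize_role)
-- dict m.get(k): first match in the association list
def pvLookup : List (String × String) → String → Option String
  | [], _ => none
  | (k, v) :: rest, key => if k = key then some v else pvLookup rest key

-- Python `x or y` on optional strings: "" and None are falsy
def pvOr (a b : Option String) : Option String :=
  match a with
  | some s => if s = "" then b else some s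
  | none => b

def normalize_role (r : Option String) : Option String :=
  if r = some "human" ∨ r = some "user" then some "user"
  else if r = some "gpt" ∨ r = some "assistant" ∨ r = some "bot" then some "assistant"
  else if r = some "system" then some "system"
  else none

def pvRoleOf (m : List (String × String)) : Option String :=
  normalize_role (pvOr (pvOr (pvLookup m "role") (pvLookup m "from")) (pvLookup m "speaker"))

def pvContentOf (m : List (String × String)) : String :=
  (pvOr (pvOr (pvOr (pvLookup m "content") (pvLookup m "value")) (pvLookup m "text")) (some "")).getD ""

-- A's first loop: build msgs (none = an early `return False`)
def pvCollect : List (List (String × String)) → Option (List String)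
  | [] => some []
  | m :: rest =>
    match pvRoleOf m with
    | none => none
    | some r =>
      if PySem.Str.len (PySem.Str.strip (pvContentOf m)) = 0 then none
      else if r = "system" then none
      else (pvCollect rest).map (fun ms => r :: ms)

-- A's second loop: `for i in range(1, len(msgs)): if msgs[i] == msgs[i-1]: return False`
def pvCheckAlt : List String → Bool
  | a :: b :: rest => if b = a then false else pvCheckAlt (b :: rest)
  | _ => true

def is_good_conv (conv : List (List (String × String))) : Bool :=
  if conv.length < 2 then false
  else
    match pvCollect conv with
    | none => false
    | some msgs =>
      if PySem.List.pyGet? msgs 0 ≠ some "user" then false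
      else pvCheckAlt msgs

-- ===== PORT B =====
-- B's single pass, carrying the expected role
def pvAltLoop : String → List (List (String × String)) → Bool
  | _, [] => true
  | expected, m :: rest =>
    match pvRoleOf m with
    | none => false
    | some r =>
      if PySem.Str.len (PySem.Str.strip (pvContentOf m)) = 0 then false
      else if r ≠ expected then false
      else pvAltLoop (if expected = "user" then "assistant" else "user") rest

def is_good_conv_alt (conv : List (List (String × String))) : Bool :=
  if conv.length < 2 then false
  else pvAltLoop "user" conv

-- ===== PRECONDITION & SPEC =====
def Spec_is_good_conv (conv : List (List (String × String))) (out : Bool) : Prop := out = is_good_conv_alt conv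
instance (conv : List (List (String × String))) (out : Bool) : Decidable (Spec_is_good_conv conv out) := by unfold Spec_is_good_conv; infer_instance

-- ===== CLAIM (what is proved, stated in full; the proofs are below) =====
def Claim_equal_is_good_conv : Prop := ∀ (conv : List (List (String × String))), Dom_is_good_conv conv → Spec_is_good_conv conv (is_good_conv conv)

-- ===== LEMMAS AND PROOFS =====
def pvFlip (e : String) : String := if e = "user" then "assistant" else "user"

-- B's loop expressed on A's collected role list
def pvStartsAlt (e : String) : List String → Bool
  | [] => true
  | r :: rs => if r ≠ e then false else pvStartsAlt (pvFlip e) rs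

lemma pvAltLoop_collect (conv : List (List (String × String))) :
    ∀ e, e = "user" ∨ e = "assistant" →
      pvAltLoop e conv =
        match pvCollect conv with
        | none => false
        | some msgs => pvStartsAlt e msgs := by
  induction conv with
  | nil => intro e _; simp [pvAltLoop, pvCollect, pvStartsAlt]
  | cons m rest ih =>
    intro e he
    simp only [pvAltLoop, pvCollect]
    cases hro : pvRoleOf m with
    | none => simp
    | some r =>
      by_cases h1 : PySem.Str.len (PySem.Str.strip (pvContentOf m)) = 0
      · simp only [if_pos h1]
      · simp only [if_neg h1]
        by_cases h2 : r = "system"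
        · subst h2
          have hne : ("system" : String) ≠ e := by rcases he with he | he <;> subst he <;> decide
          simp [hne]
        · simp only [if_neg h2]
          have hflip : (if e = "user" then "assistant" else "user") = "user" ∨
              (if e = "user" then "assistant" else "user") = "assistant" := by
            rcases he with he | he <;> subst he <;> simp
          rw [ih _ hflip]
          cases hc : pvCollect rest with
          | none => simp
          | some ms =>
            by_cases h3 : r = e <;> simp [pvStartsAlt, pvFlip, h3]

lemma pvCollect_mem : ∀ (conv : List (List (String × String))) (msgs : List String),
    pvCollect conv = some msgs → ∀ r ∈ msgs, r = "user" ∨ r = "assistant" := by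
  intro conv
  induction conv with
  | nil => intro msgs h; simp [pvCollect] at h; subst h; simp
  | cons m rest ih =>
    intro msgs h r hr
    simp only [pvCollect] at h
    cases hro : pvRoleOf m with
    | none => rw [hro] at h; simp at h
    | some r0 =>
      rw [hro] at h
      dsimp only at h
      by_cases h1 : PySem.Str.len (PySem.Str.strip (pvContentOf m)) = 0
      · rw [if_pos h1] at h; simp at h
      · rw [if_neg h1] at h
        by_cases h2 : r0 = "system"
        · rw [if_pos h2] at h; simp at h
        · rw [if_neg h2] at h
          cases hc : pvCollect rest with
          | none => rw [hc] at h; simp at h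
          | some ms =>
            rw [hc] at h
            simp only [Option.map_some, Option.some.injEq] at h
            subst h
            rcases List.mem_cons.mp hr with h | h
            · subst h
              unfold pvRoleOf normalize_role at hro
              split_ifs at hro <;> simp_all
            · exact ih ms hc r h

lemma pvCollect_length : ∀ (conv : List (List (String × String))) (msgs : List String),
    pvCollect conv = some msgs → msgs.length = conv.length := by
  intro conv
  induction conv with
  | nil => intro msgs h; simp [pvCollect] at h; subst h; simp
  | cons m rest ih =>
    intro msgs h
    simp only [pvCollect] at h
    cases hro : pvRoleOf m with
    | none => rw [hro] at h; simp at h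
    | some r0 =>
      rw [hro] at h
      dsimp only at h
      by_cases h1 : PySem.Str.len (PySem.Str.strip (pvContentOf m)) = 0
      · rw [if_pos h1] at h; simp at h
      · rw [if_neg h1] at h
        by_cases h2 : r0 = "system"
        · rw [if_pos h2] at h; simp at h
        · rw [if_neg h2] at h
          cases hc : pvCollect rest with
          | none => rw [hc] at h; simp at h
          | some ms =>
            rw [hc] at h
            simp only [Option.map_some, Option.some.injEq] at h
            subst h
            simp [ih ms hc]

lemma pvChain : ∀ (rs : List String) (r : String),
    (∀ x ∈ rs, x = "user" ∨ x = "assistant") → (r = "user" ∨ r = "assistant") →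
    pvCheckAlt (r :: rs) = pvStartsAlt (pvFlip r) rs := by
  intro rs
  induction rs with
  | nil => intro r _ _; simp [pvCheckAlt, pvStartsAlt]
  | cons b rest ih =>
    intro r hall hr
    have hb : b = "user" ∨ b = "assistant" := hall b (by simp)
    have hrest : ∀ x ∈ rest, x = "user" ∨ x = "assistant" := fun x hx => hall x (by simp [hx])
    have ihu := ih "user" hrest (Or.inl rfl)
    have iha := ih "assistant" hrest (Or.inr rfl)
    rcases hr with hr | hr <;> rcases hb with hb | hb <;> subst hr <;> subst hb <;>
      simp_all [pvCheckAlt, pvStartsAlt, pvFlip]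

-- ===== VERDICT (by name: the statement is the Claim_ definition above) =====
theorem is_good_conv_spec : Claim_equal_is_good_conv := by
  intro conv _
  unfold Spec_is_good_conv is_good_conv is_good_conv_alt
  by_cases hlen : conv.length < 2
  · simp [hlen]
  · simp only [if_neg hlen]
    rw [pvAltLoop_collect conv "user" (Or.inl rfl)]
    cases hc : pvCollect conv with
    | none => simp
    | some msgs =>
      have hmem := pvCollect_mem conv msgs hc
      have hlength := pvCollect_length conv msgs hc
      cases msgs with
      | nil => exfalso; simp at hlength; omega
      | cons r rs =>
        simp only [pvStartsAlt]
        by_cases hru : r = "user"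
        · subst hru
          have hch := pvChain rs "user" (fun x hx => hmem x (by simp [hx])) (Or.inl rfl)
          simp [hch, pvFlip]
        · simp [hru]
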